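-- pv_equiv track=rewrite | github.com/jocodoma/coding-interview-prep | LeetCode/Problems/0383_Ransom_Note/ransom_note.py | __hash_mapv2
-- ===== SOURCE A (Python) =====
-- from collections import defaultdict
--
-- def __hash_mapv2(ransomNote: str, magazine: str) -> bool:
--     mag_dict = defaultdict(int)
--     for letter in magazine:
--         mag_dict[letter] += 1
--
--     for letter in ransomNote:
--         mag_dict[letter] -= 1
--         if mag_dict[letter] < 0:
--             return False
--
--     return True
-- ===== SOURCE B (Python) =====
-- def __hash_mapv2(ransomNote: str, magazine: str) -> bool:
--     # Sort both strings, then one merge-style two-pointer scan: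
--     # greedily match each needed character against the sorted magazine.
--     need = sorted(ransomNote)
--     have = sorted(magazine)
--     i = 0
--     for c in have:
--         if i < len(need) and need[i] == c:
--             i += 1
--     return i == len(need)
-- ===== Notes on version B (the rewrite author's own statement) =====
-- stated objective: alternative
-- what changed: Replaces the frequency-dictionary build and per-letter decrement loop with early return by sorting both strings and running a single merge-style two-pointer scan that greedily matches the sorted note against the sorted magazine.
import Mathlib
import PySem

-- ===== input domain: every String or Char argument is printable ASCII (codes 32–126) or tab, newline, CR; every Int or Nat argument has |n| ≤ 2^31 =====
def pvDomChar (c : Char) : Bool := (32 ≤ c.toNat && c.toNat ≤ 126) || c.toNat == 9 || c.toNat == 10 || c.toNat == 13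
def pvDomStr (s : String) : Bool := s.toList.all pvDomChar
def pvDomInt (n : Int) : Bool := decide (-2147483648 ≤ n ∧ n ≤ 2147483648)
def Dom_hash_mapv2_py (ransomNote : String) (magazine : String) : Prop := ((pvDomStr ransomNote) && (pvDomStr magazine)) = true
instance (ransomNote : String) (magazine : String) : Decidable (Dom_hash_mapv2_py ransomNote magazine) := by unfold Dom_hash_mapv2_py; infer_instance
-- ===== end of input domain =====

-- B replaces A's frequency-dictionary decrement loop (with early return) by sorting
-- both strings and one merge-style two-pointer scan (alternative algorithm, same task).


-- ===== PORT A =====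
-- the 'for letter in ransomNote' loop with its early 'return False'
def hashMapv2Loop (d : PySem.Dict Char Int) : List Char → Bool
  | [] => true
  | c :: cs =>
      let d' := d.modify c 0 (· - 1)
      if d'.getD c 0 < 0 then false else hashMapv2Loop d' cs

def hash_mapv2_py (ransomNote : String) (magazine : String) : Bool :=
  let magDict := magazine.toList.foldl (fun d letter => d.modify letter 0 (· + 1)) PySem.Dict.empty
  hashMapv2Loop magDict ransomNote.toList

-- ===== PORT B =====
-- Source B's 'for c in have' scan; the index i into need is rendered as the
-- remaining suffix need[i:] ('i < len(need) and need[i] == c' = head match),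
-- and 'i == len(need)' at the end is the suffix being empty.
def twoPtrScan : List Char → List Char → List Char
  | need, [] => need
  | need, c :: hs =>
      match need with
      | [] => twoPtrScan [] hs
      | x :: rs => if x = c then twoPtrScan rs hs else twoPtrScan (x :: rs) hs

def hash_mapv2_py_alt (ransomNote : String) (magazine : String) : Bool :=
  let need := PySem.List.sorted ransomNote.toList (fun x => x) false
  let hav := PySem.List.sorted magazine.toList (fun x => x) false
  (twoPtrScan need hav).isEmpty

-- ===== PRECONDITION & SPEC =====
def Spec_hash_mapv2_py (ransomNote : String) (magazine : String) (out : Bool) : Prop := out = hash_mapv2_py_alt ransomNote magazine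
instance (ransomNote : String) (magazine : String) (out : Bool) : Decidable (Spec_hash_mapv2_py ransomNote magazine out) := by unfold Spec_hash_mapv2_py; infer_instance

-- ===== CLAIM (what is proved, stated in full; the proofs are below) =====
def Claim_equal_hash_mapv2_py : Prop := ∀ (ransomNote : String) (magazine : String), Dom_hash_mapv2_py ransomNote magazine → Spec_hash_mapv2_py ransomNote magazine (hash_mapv2_py ransomNote magazine)

-- ===== LEMMAS AND PROOFS =====

-- A's decrement loop succeeds iff every letter's multiplicity in the remaining
-- note is covered by the current dictionary value.
theorem hashMapv2Loop_eq_true_iff (cs : List Char) :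
    ∀ d : PySem.Dict Char Int,
      (hashMapv2Loop d cs = true ↔ ∀ c ∈ cs, (cs.count c : Int) ≤ d.getD c 0) := by
  induction cs with
  | nil => intro d; simp [hashMapv2Loop]
  | cons c cs ih =>
      intro d
      simp only [hashMapv2Loop, PySem.Dict.getD_modify_self]
      have hcount : ∀ x : Char, ((c :: cs).count x : Int)
          = (cs.count x : Int) + (if x = c then 1 else 0) := by
        intro x
        rcases eq_or_ne x c with rfl | hxc
        · simp
        · simp [hxc, Ne.symm hxc]
      by_cases hneg : d.getD c 0 - 1 < 0
      · simp only [if_pos hneg, Bool.false_eq_true, false_iff]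
        intro h
        have := h c (by simp)
        rw [hcount c] at this
        have hcnt : (0 : Int) ≤ (cs.count c : Int) := by positivity
        simp at this
        omega
      · simp only [if_neg hneg, ih]
        constructor
        · intro h x hx
          rw [hcount x]
          rcases List.mem_cons.mp hx with hxc | hx'
          · subst hxc
            by_cases hmem : x ∈ cs
            · have := h x hmem
              rw [PySem.Dict.getD_modify_self] at this
              omega
            · simp [List.count_eq_zero_of_not_mem hmem]
              omega
          · have := h x hx'
            rw [PySem.Dict.getD_modify] at this
            by_cases hxc : x = c
            · subst hxc; simp at this ⊢; omega
            · simp only [if_neg hxc] at this ⊢; omega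
        · intro h x hx
          have := h x (List.mem_cons_of_mem _ hx)
          rw [hcount x] at this
          rw [PySem.Dict.getD_modify]
          by_cases hxc : x = c
          · subst hxc; simp at this ⊢; omega
          · simp only [if_neg hxc] at this ⊢; omega

-- The greedy two-pointer scan exhausts 'need' exactly when it is a sublist
-- (subsequence) of 'have' — true on arbitrary lists, sortedness not needed here.
theorem twoPtrScan_eq_nil_iff (hav : List Char) :
    ∀ need : List Char, (twoPtrScan need hav = [] ↔ List.Sublist need hav) := by
  induction hav with
  | nil =>
      intro need
      cases need <;> simp [twoPtrScan]
  | cons c hs ih =>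
      intro need
      match need with
      | [] => simp [twoPtrScan, ih]
      | x :: rs =>
          simp only [twoPtrScan]
          by_cases hxc : x = c
          · subst hxc
            rw [if_pos rfl, ih]
            exact (List.cons_sublist_cons).symm
          · rw [if_neg hxc, ih]
            constructor
            · exact fun h => h.cons c
            · intro h
              cases h with
              | cons _ h' => exact h'
              | cons₂ _ h' => exact absurd rfl hxc

-- On sorted lists, being a sub-multiset (count-wise inclusion) is the same as
-- being a sublist; counts transfer through sorting by permutation.
theorem alt_eq_true_iff (r m : String) :
    (hash_mapv2_py_alt r m = true ↔
      ∀ c ∈ r.toList, r.toList.count c ≤ m.toList.count c) := by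
  unfold hash_mapv2_py_alt
  rw [List.isEmpty_iff, twoPtrScan_eq_nil_iff]
  have hpr := PySem.List.sorted_perm r.toList (fun x : Char => x) false
  have hpm := PySem.List.sorted_perm m.toList (fun x : Char => x) false
  constructor
  · intro h c hc
    have hsub := h.subperm
    rw [List.subperm_ext_iff] at hsub
    have := hsub c ((hpr.mem_iff).mpr hc)
    rwa [hpr.count_eq, hpm.count_eq] at this
  · intro h
    apply List.sublist_of_subperm_of_pairwise (r := (· ≤ · : Char → Char → Prop))
    · rw [List.subperm_ext_iff]
      intro c hc
      rw [hpr.count_eq, hpm.count_eq]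
      exact h c ((hpr.mem_iff).mp hc)
    · exact PySem.List.sorted_pairwise r.toList (fun x : Char => x)
    · exact PySem.List.sorted_pairwise m.toList (fun x : Char => x)

-- ===== VERDICT (by name: the statement is the Claim_ definition above) =====
theorem hash_mapv2_py_spec : Claim_equal_hash_mapv2_py := by
  intro r m _
  unfold Spec_hash_mapv2_py
  have hA : hash_mapv2_py r m = true ↔
      ∀ c ∈ r.toList, r.toList.count c ≤ m.toList.count c := by
    unfold hash_mapv2_py
    rw [hashMapv2Loop_eq_true_iff]
    constructor <;> intro h c hc <;> have := h c hc <;>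
      rw [PySem.Dict.getD_foldl_modify_add_one, PySem.Dict.getD_empty] at * <;>
      · simp only [zero_add] at *; exact_mod_cast this
  have hB := alt_eq_true_iff r m
  rcases hb : hash_mapv2_py_alt r m with _ | _
  · rcases ha : hash_mapv2_py r m with _ | _
    · rfl
    · exact absurd (hB.mpr (hA.mp ha)) (by simp [hb])
  · exact hA.mpr (hB.mp hb)
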